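-- pv_equiv track=rewrite | github.com/Vexus1/advent_of_code | day13.py | create_grids
-- ===== SOURCE A (Python) =====
-- def create_grids(data: list[str]) -> list[list[str]]:
--     grids = [[]]
--     for string in data:
--         if string == '':
--             grids.append([])
--             continue
--         grids[-1].append(string)
--     return grids
-- ===== SOURCE B (Python) =====
-- def create_grids(data: list[str]) -> list[list[str]]:
--     # Index-then-slice: find blank-line positions, then slice between boundary markers.
--     seps = [i for i, s in enumerate(data) if s == '']
--     bounds = [-1] + seps + [len(data)]
--     return [data[bounds[j] + 1 : bounds[j + 1]] for j in range(len(bounds) - 1)]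
-- ===== Notes on version B (the rewrite author's own statement) =====
-- stated objective: alternative
-- what changed: B first collects the blank-line indices in one enumerate pass and then slices data between consecutive boundary markers, instead of A's element-by-element loop that appends each line to the last group.
import Mathlib
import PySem

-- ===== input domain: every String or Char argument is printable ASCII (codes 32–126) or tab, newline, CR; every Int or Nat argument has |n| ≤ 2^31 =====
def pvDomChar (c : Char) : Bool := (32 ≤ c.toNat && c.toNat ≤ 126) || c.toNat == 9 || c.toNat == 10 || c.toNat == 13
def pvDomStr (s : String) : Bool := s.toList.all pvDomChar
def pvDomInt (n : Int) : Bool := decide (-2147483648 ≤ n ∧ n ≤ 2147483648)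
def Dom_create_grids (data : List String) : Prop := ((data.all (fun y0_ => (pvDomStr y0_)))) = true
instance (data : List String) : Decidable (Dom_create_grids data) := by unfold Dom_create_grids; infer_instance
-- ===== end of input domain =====

-- B finds the blank-line positions in one pass and slices between boundary markers,
-- instead of A's element-by-element loop appending to the last group; same cost, different structure.

-- ===== PORT A =====
-- grids[-1].append(string): append to the last group (grids is never empty)
def pvAppendLast (gs : List (List String)) (s : String) : List (List String) :=
  match gs with
  | [] => []
  | [g] => [g ++ [s]]
  | g :: rest => g :: pvAppendLast rest s

def create_grids (data : List String) : List (List String) :=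
  data.foldl (fun grids string =>
    if string = "" then grids ++ [[]]
    else pvAppendLast grids string) [[]]

-- ===== PORT B =====
-- seps = [i for i, s in enumerate(data) if s == '']; bounds = [-1] + seps + [len(data)];
-- [data[bounds[j]+1 : bounds[j+1]] for j in range(len(bounds)-1)]  (bounds[j] is always in range)
def create_grids_alt (data : List String) : List (List String) :=
  let seps : List Int := ((PySem.List.enumerate data 0).filter (fun p => p.2 == "")).map (fun p => p.1)
  let bounds : List Int := [-1] ++ seps ++ [(data.length : Int)]
  (List.range (bounds.length - 1)).map (fun j =>
    PySem.List.slice data (some (bounds.getD j 0 + 1)) (some (bounds.getD (j + 1) 0)))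

-- ===== PRECONDITION & SPEC =====
def Spec_create_grids (data : List String) (out : List (List String)) : Prop := out = create_grids_alt data
instance (data : List String) (out : List (List String)) : Decidable (Spec_create_grids data out) := by unfold Spec_create_grids; infer_instance

-- ===== CLAIM (what is proved, stated in full; the proofs are below) =====
def Claim_equal_create_grids : Prop := ∀ (data : List String), Dom_create_grids data → Spec_create_grids data (create_grids data)

-- ===== LEMMAS AND PROOFS =====

-- reference splitter: head of the result is the current (first) group
def pvSplit (data : List String) : List (List String) :=
  match data with
  | [] => [[]]
  | s :: rest =>
    if s = "" then [] :: pvSplit rest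
    else (s :: (pvSplit rest).headD []) :: (pvSplit rest).drop 1

theorem pvSplit_ne_nil (data : List String) : pvSplit data ≠ [] := by
  cases data with
  | nil => simp [pvSplit]
  | cons s rest => simp only [pvSplit]; split <;> simp

-- ---- A = pvSplit ----
def pvMapHead (g : List String) (gs : List (List String)) : List (List String) :=
  match gs with
  | [] => []
  | h :: t => (g ++ h) :: t

theorem appendLast_append (gs : List (List String)) (g : List String) (s : String) :
    pvAppendLast (gs ++ [g]) s = gs ++ [g ++ [s]] := by
  induction gs with
  | nil => rfl
  | cons h t ih =>
    cases t with
    | nil => simp [pvAppendLast]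
    | cons h' t' => simp only [List.cons_append, pvAppendLast]; simp [pvAppendLast] at ih ⊢; exact ih

theorem foldl_split (data : List String) (gs : List (List String)) (g : List String) :
    data.foldl (fun grids string =>
      if string = "" then grids ++ [[]]
      else pvAppendLast grids string) (gs ++ [g]) = gs ++ pvMapHead g (pvSplit data) := by
  induction data generalizing gs g with
  | nil => simp [pvMapHead, pvSplit]
  | cons s rest ih =>
    simp only [List.foldl]
    by_cases hs : s = ""
    · subst hs
      rw [if_pos rfl]
      have := ih (gs := gs ++ [g]) (g := [])
      rw [List.append_assoc] at this
      rw [List.append_assoc, this]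
      have hne := pvSplit_ne_nil rest
      cases hsp : pvSplit rest with
      | nil => exact absurd hsp hne
      | cons h t => simp [pvSplit, pvMapHead, hsp]
    · rw [if_neg hs, appendLast_append, ih]
      have hne := pvSplit_ne_nil rest
      cases hsp : pvSplit rest with
      | nil => exact absurd hsp hne
      | cons h t =>
        simp [pvSplit, pvMapHead, hs, hsp]

theorem a_eq_split (data : List String) : create_grids data = pvSplit data := by
  have := foldl_split data [] []
  simp only [List.nil_append] at this
  rw [create_grids, this]
  have hne := pvSplit_ne_nil data
  cases hsp : pvSplit data with
  | nil => exact absurd hsp hne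
  | cons h t => simp [pvMapHead]

-- ---- B = pvSplit ----
def pvPairs (l : List Int) : List (Int × Int) := l.zip l.tail

def pvG (data : List String) (p : Int × Int) : List String :=
  PySem.List.slice data (some (p.1 + 1)) (some p.2)

def pvSeps (xs : List String) (s : Int) : List Int :=
  ((PySem.List.enumerate xs s).filter (fun p => p.2 == "")).map (fun p => p.1)

theorem pvSeps_cons (x : String) (xs : List String) (s : Int) :
    pvSeps (x :: xs) s = (if x = "" then [s] else []) ++ pvSeps xs (s + 1) := by
  simp only [pvSeps, PySem.List.enumerate_cons, List.filter_cons]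
  by_cases hx : x = "" <;> simp [hx]

theorem pvSeps_shift (xs : List String) (s : Int) :
    pvSeps xs (s + 1) = (pvSeps xs s).map (· + 1) := by
  induction xs generalizing s with
  | nil => simp [pvSeps]
  | cons x xs ih =>
    rw [pvSeps_cons, pvSeps_cons, ih (s + 1)]
    by_cases hx : x = "" <;> simp [hx]

theorem pvSeps_nonneg (xs : List String) (s : Int) (hs : 0 ≤ s) :
    ∀ i ∈ pvSeps xs s, 0 ≤ i := by
  induction xs generalizing s with
  | nil => simp [pvSeps]
  | cons x xs ih =>
    intro i hi
    rw [pvSeps_cons] at hi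
    rcases List.mem_append.1 hi with h | h
    · by_cases hx : x = "" <;> simp [hx] at h
      omega
    · exact ih (s + 1) (by omega) i h

theorem pvPairs_map_add_one (l : List Int) :
    pvPairs (l.map (· + 1)) = (pvPairs l).map (fun p => (p.1 + 1, p.2 + 1)) := by
  induction l with
  | nil => rfl
  | cons a l ih =>
    cases l with
    | nil => rfl
    | cons b t => simpa [pvPairs, List.zip] using ih

theorem pvPairs_mem (l : List Int) (p : Int × Int) (hp : p ∈ pvPairs l) :
    p.1 ∈ l ∧ p.2 ∈ l.tail := by
  have := List.of_mem_zip hp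
  exact this

theorem pv_map_range_getD {β : Type} (f : Int → Int → β) (l : List Int) :
    (List.range (l.length - 1)).map (fun j => f (l.getD j 0) (l.getD (j + 1) 0))
      = (pvPairs l).map (fun p => f p.1 p.2) := by
  induction l with
  | nil => simp [pvPairs]
  | cons a l ih =>
    cases l with
    | nil => simp [pvPairs]
    | cons b t =>
      have hlen : (a :: b :: t).length - 1 = (b :: t).length - 1 + 1 := by simp
      rw [hlen, List.range_succ_eq_map, List.map_cons, List.map_map]
      have : ((List.range ((b :: t).length - 1)).map
          ((fun j => f ((a :: b :: t).getD j 0) ((a :: b :: t).getD (j + 1) 0)) ∘ Nat.succ))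
          = (List.range ((b :: t).length - 1)).map
            (fun j => f ((b :: t).getD j 0) ((b :: t).getD (j + 1) 0)) := by
        apply List.map_congr_left
        intro j _
        simp [Function.comp]
      rw [this, ih]
      simp [pvPairs, List.zip]

theorem pvG_shift (x : String) (xs : List String) (p : Int × Int)
    (h1 : -1 ≤ p.1) (h2 : 0 ≤ p.2) :
    pvG (x :: xs) (p.1 + 1, p.2 + 1) = pvG xs p := by
  obtain ⟨a, b⟩ := p
  have h1' : -1 ≤ a := h1
  have h2' : 0 ≤ b := h2
  simp only [pvG]
  rw [PySem.List.slice_toNat, PySem.List.slice_toNat]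
  · have ha : (a + 1 + 1).toNat = (a + 1).toNat + 1 := by omega
    have hb : (b + 1).toNat = b.toNat + 1 := by omega
    rw [ha, hb, List.drop_succ_cons]
    congr 1
    omega
  all_goals omega

theorem pvG_head (x : String) (xs : List String) (b : Int) (hb : 0 ≤ b) :
    pvG (x :: xs) (-1, b + 1) = x :: pvG xs (-1, b) := by
  simp only [pvG]
  rw [show (-1 : Int) + 1 = 0 by norm_num, PySem.List.slice_toNat, PySem.List.slice_toNat]
  · have hb1 : (b + 1).toNat = b.toNat + 1 := by omega
    simp [hb1]
  all_goals omega

theorem pvG_empty (data : List String) : pvG data (-1, 0) = [] := by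
  simp only [pvG]
  rw [show (-1 : Int) + 1 = 0 by norm_num, PySem.List.slice_toNat]
  · simp
  all_goals omega

theorem exists_cons_append (S : List Int) (n : Int) : ∃ h t, S ++ [n] = h :: t := by
  cases S with
  | nil => exact ⟨n, [], rfl⟩
  | cons a s => exact ⟨a, s ++ [n], rfl⟩

theorem b_main (data : List String) :
    (pvPairs (-1 :: (pvSeps data 0 ++ [(data.length : Int)]))).map (pvG data) = pvSplit data := by
  induction data with
  | nil =>
    simp only [pvSeps, PySem.List.enumerate_nil, List.filter_nil, List.map_nil, List.nil_append]
    simp [pvPairs, pvG_empty, pvSplit]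
  | cons x rest ih =>
    -- the shifted boundary list of rest
    set L : List Int := pvSeps rest 0 ++ [(rest.length : Int)] with hL
    obtain ⟨h, t, hht⟩ := exists_cons_append (pvSeps rest 0) ((rest.length : Int))
    have hmemL : ∀ i ∈ L, 0 ≤ i := by
      intro i hi
      rcases List.mem_append.1 hi with hi | hi
      · exact pvSeps_nonneg rest 0 le_rfl i hi
      · simp at hi; omega
    have hshift : ∀ p ∈ pvPairs ((-1 : Int) :: L), pvG (x :: rest) (p.1 + 1, p.2 + 1) = pvG rest p := by
      intro p hp
      obtain ⟨hp1, hp2⟩ := pvPairs_mem _ p hp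
      apply pvG_shift
      · rcases List.mem_cons.1 hp1 with h1 | h1
        · omega
        · have := hmemL _ h1; omega
      · exact hmemL _ (by simpa using hp2)
    have hlen : ((x :: rest).length : Int) = (rest.length : Int) + 1 := by
      push_cast [List.length_cons]; ring
    by_cases hx : x = ""
    · subst hx
      have hbl : ((-1 : Int) :: (pvSeps ("" :: rest) 0 ++ [((("" :: rest).length : Nat) : Int)]))
          = -1 :: ((-1 :: L).map (· + 1)) := by
        rw [pvSeps_cons, if_pos rfl, pvSeps_shift, hlen, hL]
        simp
      rw [hbl]
      have hpp : pvPairs ((-1 : Int) :: ((-1 :: L).map (· + 1)))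
          = (-1, 0) :: pvPairs (((-1 : Int) :: L).map (· + 1)) := by
        have hm : ((-1 : Int) :: L).map (· + 1) = 0 :: L.map (· + 1) := by simp
        rw [hm]
        simp [pvPairs, List.zip]
      rw [hpp, List.map_cons, pvG_empty, pvPairs_map_add_one, List.map_map]
      have hcg : (pvPairs ((-1 : Int) :: L)).map (pvG ("" :: rest) ∘ fun p => (p.1 + 1, p.2 + 1))
          = (pvPairs ((-1 : Int) :: L)).map (pvG rest) := by
        apply List.map_congr_left
        intro p hp
        exact hshift p hp
      rw [hcg, ih]
      simp [pvSplit]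
    · rw [pvSeps_cons]
      simp only [if_neg hx, List.nil_append]
      rw [pvSeps_shift, hlen]
      have hmap : (pvSeps rest 0).map (· + 1) ++ [(rest.length : Int) + 1] = L.map (· + 1) := by
        simp [hL]
      rw [hmap, show L = h :: t from hL.trans hht]
      have hh0 : 0 ≤ h := hmemL h (by rw [hL, hht]; exact List.mem_cons_self ..)
      have hpp : pvPairs ((-1 : Int) :: (h :: t).map (· + 1))
          = (-1, h + 1) :: pvPairs ((h :: t).map (· + 1)) := by rfl
      rw [hpp, List.map_cons]
      have hfirst : pvG (x :: rest) (-1, h + 1) = x :: pvG rest (-1, h) := pvG_head x rest h hh0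
      rw [hfirst, pvPairs_map_add_one, List.map_map]
      have hcong : (pvPairs (h :: t)).map (pvG (x :: rest) ∘ fun p => (p.1 + 1, p.2 + 1))
          = (pvPairs (h :: t)).map (pvG rest) := by
        apply List.map_congr_left
        intro p hp
        apply hshift
        rw [hL, hht]
        exact List.mem_cons_of_mem _ hp
      have hIH : pvSplit rest = pvG rest (-1, h) :: (pvPairs (h :: t)).map (pvG rest) := by
        rw [← ih, hL.trans hht]; rfl
      rw [hcong]
      simp [pvSplit, hx, hIH]

theorem alt_eq_split (data : List String) : create_grids_alt data = pvSplit data := by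
  have h := pv_map_range_getD (fun a b => PySem.List.slice data (some (a + 1)) (some b))
    ((-1) :: (pvSeps data 0 ++ [(data.length : Int)]))
  simp only [create_grids_alt]
  have hb : (([-1] : List Int) ++ ((PySem.List.enumerate data 0).filter (fun p => p.2 == "")).map (fun p => p.1) ++ [(data.length : Int)])
      = (-1) :: (pvSeps data 0 ++ [(data.length : Int)]) := by
    simp [pvSeps]
  rw [hb, h]
  exact b_main data

-- ===== VERDICT (by name: the statement is the Claim_ definition above) =====
theorem create_grids_spec : Claim_equal_create_grids := by
  intro data _
  unfold Spec_create_grids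
  rw [a_eq_split, alt_eq_split]
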